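-- pv_equiv track=rewrite | github.com/soft-rain/EPPER | 15-03.py | solution
-- ===== SOURCE A (Python) =====
-- def solution(n, m):
--     answer = 0  # 재고가 떨어지는데 걸리는 날짜
--     p = 0  # m일에 한 번 재고가 들어오는 날짜 flag
--     while n:  # 재고가 0이 될 때까지 반복
--         n -= 1  # 재고 1씩 감소
--         answer += 1  # 날짜 1씩 증가
--         p += 1
--         if p == m:  # m일 지나고 재고 n은 1증가, 날짜 p는 다시 0
--             n += 1
--             p = 0
--     return answer
-- ===== SOURCE B (Python) =====
-- def solution(n, m):
--     # Closed form: every m-th day restocks 1, so m-1 net units are consumed per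
--     # m-day cycle; the (n-1)//(m-1) restocks extend the run by that many days.
--     if m <= 1 or n == 0:
--         return n
--     return n + (n - 1) // (m - 1)
-- ===== Notes on version B (the rewrite author's own statement) =====
-- stated objective: faster
-- what changed: Replaced the day-by-day simulation loop with a closed-form formula n + (n-1)//(m-1) using floor division over m-day restock cycles.
import Mathlib
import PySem

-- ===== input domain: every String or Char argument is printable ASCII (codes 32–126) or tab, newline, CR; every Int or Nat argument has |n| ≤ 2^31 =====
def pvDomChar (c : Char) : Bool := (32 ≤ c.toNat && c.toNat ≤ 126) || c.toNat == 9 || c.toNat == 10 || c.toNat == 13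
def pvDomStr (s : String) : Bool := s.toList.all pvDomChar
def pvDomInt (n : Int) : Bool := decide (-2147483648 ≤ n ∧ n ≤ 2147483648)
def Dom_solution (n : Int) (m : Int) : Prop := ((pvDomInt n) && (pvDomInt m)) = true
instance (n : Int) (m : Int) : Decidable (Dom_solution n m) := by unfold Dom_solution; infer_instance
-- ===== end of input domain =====

-- B replaces A's day-by-day simulation loop with a closed-form floor-division formula (faster).


-- ===== PORT A =====
-- Python's `while n:` loop, transliterated as fuel recursion (the fuel only makes the
-- recursion total; on Pre_ the loop runs at most 2n-1 < fuel steps, proved below).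
def solutionLoop (fuel : Nat) (m n p answer : Int) : Int :=
  match fuel with
  | 0 => answer
  | fuel + 1 =>
    if n = 0 then answer
    else
      -- n -= 1; answer += 1; p += 1; if p == m: n += 1; p = 0
      if p + 1 = m then solutionLoop fuel m n 0 (answer + 1)
      else solutionLoop fuel m (n - 1) (p + 1) (answer + 1)

def solution (n : Int) (m : Int) : Int :=
  solutionLoop (2 * n.toNat + 2) m n 0 0

-- ===== PORT B =====
def solution_alt (n : Int) (m : Int) : Int :=
  if m ≤ 1 ∨ n = 0 then n
  else n + PySem.Int.floordiv (n - 1) (m - 1)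

-- ===== PRECONDITION & SPEC =====
-- Pre_ excludes exactly the inputs on which Python A never returns: n < 0 (the loop
-- decrements past zero forever) and m = 1 with n ≠ 0 (each day's restock cancels the
-- consumption, so the stock never reaches 0).
def Pre_solution (n : Int) (m : Int) : Prop := 0 ≤ n ∧ (m ≠ 1 ∨ n = 0)
instance (n : Int) (m : Int) : Decidable (Pre_solution n m) := by unfold Pre_solution; infer_instance
def pvWitness_solution : Int × Int := (7, 3)

def Spec_solution (n : Int) (m : Int) (out : Int) : Prop := out = solution_alt n m
instance (n : Int) (m : Int) (out : Int) : Decidable (Spec_solution n m out) := by unfold Spec_solution; infer_instance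

-- ===== CLAIM (what is proved, stated in full; the proofs are below) =====
def Claim_equal_solution : Prop := ∀ (n : Int) (m : Int), Dom_solution n m → Pre_solution n m → Spec_solution n m (solution n m)

-- ===== LEMMAS AND PROOFS =====

-- With no restock ever firing (m ≤ 0), the loop counts down n days.
lemma loop_no_restock (m : Int) (hm : m ≤ 0) :
    ∀ (fuel : Nat) (n p a : Int), 0 ≤ n → 0 ≤ p → n ≤ fuel →
      solutionLoop fuel m n p a = a + n := by
  intro fuel
  induction fuel with
  | zero => intro n p a hn hp hfuel; simp [solutionLoop]; omega
  | succ fuel ih =>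
    intro n p a hn hp hfuel
    by_cases h0 : n = 0
    · simp [solutionLoop, h0]
    · have hne : ¬ (p + 1 = m) := by omega
      simp only [solutionLoop, if_neg h0, if_neg hne]
      have := ih (n - 1) (p + 1) (a + 1) (by omega) (by omega) (by push_cast at hfuel; omega)
      omega

-- With m ≥ 2 and cycle position p, the remaining number of days is n + (n-1+p)/(m-1).
lemma loop_formula (m : Int) (hm : 2 ≤ m) :
    ∀ (fuel : Nat) (n p a : Int), 1 ≤ n → 0 ≤ p → p ≤ m - 1 →
      n + (n - 1 + p) / (m - 1) ≤ fuel →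
      solutionLoop fuel m n p a = a + n + (n - 1 + p) / (m - 1) := by
  intro fuel
  induction fuel with
  | zero =>
    intro n p a hn hp hpm hfuel
    exfalso
    have : (0:Int) ≤ (n - 1 + p) / (m - 1) := Int.ediv_nonneg (by omega) (by omega)
    simp at hfuel; omega
  | succ fuel ih =>
    intro n p a hn hp hpm hfuel
    have h0 : ¬ n = 0 := by omega
    by_cases hres : p + 1 = m
    · -- restock day: p = m - 1, the quotient drops by exactly 1
      have hq : (n - 1 + p) / (m - 1) = (n - 1) / (m - 1) + 1 := by
        have : n - 1 + p = (n - 1) + 1 * (m - 1) := by omega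
        rw [this, Int.add_mul_ediv_right _ _ (by omega : m - 1 ≠ 0)]
      have hz : n - 1 + 0 = n - 1 := by ring
      simp only [solutionLoop, if_neg h0, if_pos hres]
      rw [ih n 0 (a + 1) hn le_rfl (by omega) (by rw [hz]; push_cast at hfuel; omega), hz, hq]
      omega
    · by_cases h1 : n = 1
      · -- last unit: loop exits on the next check
        have hq : (n - 1 + p) / (m - 1) = 0 :=
          Int.ediv_eq_zero_of_lt (by omega) (by omega)
        simp only [solutionLoop, if_neg h0, if_neg hres]
        have : solutionLoop fuel m (n - 1) (p + 1) (a + 1) = a + 1 := by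
          cases fuel with
          | zero => simp [solutionLoop]
          | succ fuel => simp [solutionLoop, h1]
        omega
      · simp only [solutionLoop, if_neg h0, if_neg hres]
        have hq : n - 1 - 1 + (p + 1) = n - 1 + p := by omega
        rw [ih (n - 1) (p + 1) (a + 1) (by omega) (by omega) (by omega)
              (by rw [hq]; push_cast at hfuel; omega)]
        rw [hq]; omega

-- ===== VERDICT (by name: the statement is the Claim_ definition above) =====
theorem solution_spec : Claim_equal_solution := by
  intro n m _hdom hpre
  obtain ⟨hn, hm1⟩ := hpre
  unfold Spec_solution solution solution_alt
  by_cases h0 : n = 0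
  · subst h0
    simp [solutionLoop]
  · have hn1 : 1 ≤ n := by omega
    by_cases hm : m ≤ 1
    · have hm0 : m ≤ 0 := by omega
      rw [loop_no_restock m hm0 _ n 0 0 hn le_rfl (by push_cast; omega)]
      simp [hm]
    · have hm2 : 2 ≤ m := by omega
      have hz : n - 1 + 0 = n - 1 := by ring
      have hdivle : (n - 1 + 0) / (m - 1) ≤ n - 1 := by
        rw [hz]; exact Int.ediv_le_self _ (by omega)
      rw [loop_formula m hm2 _ n 0 0 hn1 le_rfl (by omega) (by push_cast; omega)]
      rw [PySem.Int.floordiv_eq_ediv_of_pos (by omega)]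
      simp [show ¬ (m ≤ 1 ∨ n = 0) by omega]
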